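-- pv_equiv track=rewrite | github.com/JeongHPark/2022-Algorithm-Study | Programmers/jsh/14주차/두 큐합 같게 만들기.py | solution
-- ===== SOURCE A (Python) =====
-- def solution(queue1, queue2):
--     answer = -1
--     cnt=0
--     sumdata=sum(queue1)+sum(queue2)
--     if sumdata%2!=0: #2로 안나눠지면 종료
--         return -1
--     sumdata=sumdata//2
--     start=0
--     end=len(queue1)-1
--     temp=sum(queue1)
--     queues=queue1+queue2
--     while start<=end: # 투포인터 활용
--         if temp<sumdata:
--             end+=1
--             if end<len(queues): #인덱스 초과 오류가 떠서 if문 추가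
--                 temp+=queues[end]
--                 cnt+=1
--             else:
--                 break
--         elif temp>sumdata:
--             temp-=queues[start]
--             start+=1
--             cnt+=1
--         else:
--             answer=cnt
--             break
--     return answer
-- ===== SOURCE B (Python) =====
-- def solution(queue1, queue2):
--     total = sum(queue1) + sum(queue2)
--     if total % 2 != 0:
--         return -1
--     target = total // 2
--     out = queue1[::-1]   # window front: next element to leave is at the end
--     inn = []             # elements pulled into the window, oldest first
--     feed = queue2[::-1]  # pullable elements: next to pull is at the end
--     s = sum(queue1)
--     cnt = 0
--     while out or inn:
--         if s == target:
--             return cnt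
--         if s < target:
--             if not feed:
--                 return -1
--             x = feed.pop()
--             inn.append(x)
--             s += x
--         else:
--             if not out:
--                 out = inn[::-1]
--                 inn = []
--             s -= out.pop()
--         cnt += 1
--     return -1
-- ===== Notes on version B (the rewrite author's own statement) =====
-- stated objective: alternative
-- what changed: B simulates the two queues directly with an explicit two-stack queue for the first queue and a pull stack for the second, instead of A's two index pointers sliding over the concatenated list queue1+queue2; the concatenation, start/end index arithmetic and the answer/break flags disappear.
import Mathlib
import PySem

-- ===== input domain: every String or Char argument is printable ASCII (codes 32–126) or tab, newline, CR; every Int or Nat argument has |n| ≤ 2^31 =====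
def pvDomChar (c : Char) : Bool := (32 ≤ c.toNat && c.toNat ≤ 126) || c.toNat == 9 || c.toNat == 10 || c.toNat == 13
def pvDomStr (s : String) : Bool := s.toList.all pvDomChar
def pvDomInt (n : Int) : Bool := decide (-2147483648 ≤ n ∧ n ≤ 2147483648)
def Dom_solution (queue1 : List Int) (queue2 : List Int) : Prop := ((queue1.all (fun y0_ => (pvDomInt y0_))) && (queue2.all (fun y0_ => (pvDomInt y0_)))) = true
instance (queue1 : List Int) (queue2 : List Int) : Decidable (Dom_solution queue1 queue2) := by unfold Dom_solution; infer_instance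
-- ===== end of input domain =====

-- B simulates the two queues directly (a two-stack queue plus a pull stack) instead of A's two
-- index pointers over the concatenated list queue1+queue2 (alternative; equal return values).

-- ===== PORT A =====
-- the while loop of A: state (start, endp, temp, cnt) over the fixed list `queues`
def solutionLoopA (queues : List Int) (sumdata : Int) (start endp temp cnt : Int) : Int :=
  if hg : start ≤ endp then
    if temp < sumdata then
      if h2 : endp + 1 < (queues.length : Int) then
        solutionLoopA queues sumdata start (endp + 1)
          (temp + PySem.List.pyGetD queues (endp + 1) 0) (cnt + 1)
      else -1                 -- break with answer still -1
    else if temp > sumdata then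
      solutionLoopA queues sumdata (start + 1) endp
        (temp - PySem.List.pyGetD queues start 0) (cnt + 1)
    else cnt                  -- answer = cnt; break
  else -1
termination_by ((((queues.length : Int) - endp).toNat, (endp + 1 - start).toNat) : Nat ×ₗ Nat)
decreasing_by
  · exact Prod.Lex.left _ _ (by omega)
  · exact Prod.Lex.right _ (by omega)

def solution (queue1 : List Int) (queue2 : List Int) : Int :=
  let sumdata := queue1.sum + queue2.sum
  if PySem.Int.mod sumdata 2 ≠ 0 then -1
  else
    solutionLoopA (queue1 ++ queue2) (PySem.Int.floordiv sumdata 2) 0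
      ((queue1.length : Int) - 1) queue1.sum 0

-- ===== PORT B =====
-- the while loop of B: `out`/`inn` are the two stacks holding the first queue (a two-stack queue:
-- next element to leave at the end of `out`, pulled elements appended to `inn`), `feed` the
-- not-yet-pulled second-queue elements with the next one at the end (Python list.pop())
def solutionLoopB (target : Int) (out inn feed : List Int) (s cnt : Int) : Int :=
  if out.isEmpty && inn.isEmpty then -1
  else if s = target then cnt
  else if s < target then
    match hf : feed.getLast? with
    | none => -1                   -- `if not feed: return -1`
    | some x => solutionLoopB target out (inn ++ [x]) feed.dropLast (s + x) (cnt + 1)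
  else
    let out' := if out.isEmpty then inn.reverse else out
    let inn' := if out.isEmpty then ([] : List Int) else inn
    match ho : out'.getLast? with
    | none => -1                   -- unreachable: the window is nonempty here
    | some w => solutionLoopB target out'.dropLast inn' feed (s - w) (cnt + 1)
termination_by out.length + inn.length + 2 * feed.length
decreasing_by
  · have := List.getLast?_isSome (l := feed)
    simp [hf] at this
    cases feed <;> simp_all
    omega
  · cases hout : out <;> simp_all [List.length_dropLast]
    exact List.length_pos_of_ne_nil (by assumption)

def solution_alt (queue1 : List Int) (queue2 : List Int) : Int :=
  let total := queue1.sum + queue2.sum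
  if PySem.Int.mod total 2 ≠ 0 then -1
  else solutionLoopB (PySem.Int.floordiv total 2) queue1.reverse [] queue2.reverse queue1.sum 0

-- ===== PRECONDITION & SPEC =====
def Spec_solution (queue1 : List Int) (queue2 : List Int) (out : Int) : Prop := out = solution_alt queue1 queue2
instance (queue1 : List Int) (queue2 : List Int) (out : Int) : Decidable (Spec_solution queue1 queue2 out) := by unfold Spec_solution; infer_instance

-- ===== CLAIM (what is proved, stated in full; the proofs are below) =====
def Claim_equal_solution : Prop := ∀ (queue1 : List Int) (queue2 : List Int), Dom_solution queue1 queue2 → Spec_solution queue1 queue2 (solution queue1 queue2)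

-- ===== LEMMAS AND PROOFS =====

-- queues[len(dropped) + len(mid)] is the head of the remainder
lemma pyGetD_mid (dropped mid rest : List Int) (x : Int) :
    PySem.List.pyGetD (dropped ++ mid ++ x :: rest) ((dropped.length : Int) + (mid.length : Int)) 0 = x := by
  have hc : ((dropped.length : Int) + (mid.length : Int)) = ((dropped.length + mid.length : Nat) : Int) := by
    push_cast; ring
  rw [hc, PySem.List.pyGetD_natCast]
  simp [List.getD_eq_getElem?_getD]

-- queues[len(dropped)] is the head of the remainder
lemma pyGetD_head (dropped rest : List Int) (x : Int) :
    PySem.List.pyGetD (dropped ++ x :: rest) ((dropped.length : Nat) : Int) 0 = x := by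
  rw [PySem.List.pyGetD_natCast]
  simp [List.getD_eq_getElem?_getD]

lemma loopA_eq_loopB (n : Nat) : ∀ (out inn rest : List Int),
    out.length + inn.length + 2 * rest.length ≤ n →
    ∀ (dropped : List Int) (target temp cnt : Int),
    solutionLoopA (dropped ++ (out.reverse ++ inn) ++ rest) target (dropped.length : Int)
        ((dropped.length : Int) + (((out.reverse ++ inn).length : Nat) : Int) - 1) temp cnt
      = solutionLoopB target out inn rest.reverse temp cnt := by
  induction n with
  | zero =>
    intro out inn rest hlen dropped target temp cnt
    have ho : out = [] := by cases out <;> simp_all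
    have hi : inn = [] := by cases inn <;> simp_all
    have hr : rest = [] := by cases rest <;> simp_all
    subst ho; subst hi; subst hr
    rw [solutionLoopA.eq_def, solutionLoopB.eq_def]
    simp only [List.reverse_nil, List.append_nil, List.length_nil, List.isEmpty_nil, Bool.and_self,
      if_true, Nat.cast_zero]
    rw [dif_neg (by omega)]
  | succ n ih =>
    intro out inn rest hlen dropped target temp cnt
    by_cases hwin : out = [] ∧ inn = []
    · obtain ⟨ho, hi⟩ := hwin
      subst ho; subst hi
      rw [solutionLoopA.eq_def, solutionLoopB.eq_def]
      simp only [List.reverse_nil, List.append_nil, List.length_nil, List.isEmpty_nil,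
        Bool.and_self, if_true, Nat.cast_zero]
      rw [dif_neg (by omega)]
    · have hwlen : 0 < (out.reverse ++ inn).length := by
        rcases not_and_or.mp hwin with h | h <;> cases out <;> cases inn <;> simp_all
      rw [solutionLoopA.eq_def, solutionLoopB.eq_def]
      rw [dif_pos (show (dropped.length : Int)
            ≤ (dropped.length : Int) + (((out.reverse ++ inn).length : Nat) : Int) - 1 by
          omega)]
      have hbe : (out.isEmpty && inn.isEmpty) = false := by
        rcases not_and_or.mp hwin with h | h <;> cases out <;> cases inn <;> simp_all
      rw [hbe]
      simp only [Bool.false_eq_true, if_false]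
      rcases lt_trichotomy temp target with hlt | heq | hgt
      · rw [if_pos hlt, if_neg (by omega), if_pos hlt]
        cases rest with
        | nil =>
          rw [dif_neg (by simp)]
          simp
        | cons x rs =>
          rw [dif_pos (by simp)]
          have hfeed : (x :: rs).reverse.getLast? = some x := by
            simp [List.getLast?_reverse]
          rw [hfeed]
          have hdrop : (x :: rs).reverse.dropLast = rs.reverse := by
            simp [List.reverse_cons]
          rw [hdrop]
          have hidx : ((dropped.length : Int) + (((out.reverse ++ inn).length : Nat) : Int) - 1 + 1)
              = ((dropped.length : Int) + (((out.reverse ++ inn).length : Nat) : Int)) := by ring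
          rw [hidx, pyGetD_mid dropped (out.reverse ++ inn) rs x]
          have hq : dropped ++ (out.reverse ++ inn) ++ (x :: rs)
              = dropped ++ (out.reverse ++ (inn ++ [x])) ++ rs := by simp
          have he : (dropped.length : Int) + (((out.reverse ++ inn).length : Nat) : Int)
              = (dropped.length : Int) + (((out.reverse ++ (inn ++ [x])).length : Nat) : Int) - 1 := by
            push_cast [List.length_append, List.length_cons, List.length_nil, List.length_reverse]
            ring
          rw [hq, he]
          exact ih out (inn ++ [x]) rs (by simp at hlen ⊢; omega) dropped target (temp + x) (cnt + 1)
      · rw [if_neg (by omega), if_neg (by omega), if_pos heq]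
      · rw [if_neg (by omega), if_pos hgt, if_neg (by omega), if_neg (by omega)]
        split
        · -- refill stack returned `none`: impossible, the window is nonempty here
          rename_i hnone
          exfalso
          cases ho' : out with
          | nil =>
            rw [ho'] at hnone
            simp only [List.isEmpty_nil, if_true, List.getLast?_reverse,
              List.head?_eq_none_iff] at hnone
            exact hwin ⟨ho', hnone⟩
          | cons y ys =>
            rw [ho'] at hnone
            simp at hnone
        · rename_i w hf
          rcases List.eq_nil_or_concat out with ho | ⟨ys, a, rfl⟩
          · -- out is empty: the window is inn, which is refilled
            subst ho
            obtain ⟨i, is, rfl⟩ : ∃ i is, inn = i :: is := by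
              cases inn with
              | nil => exact absurd ⟨rfl, rfl⟩ hwin
              | cons i is => exact ⟨i, is, rfl⟩
            simp only [List.isEmpty_nil, if_true, List.getLast?_reverse,
              List.head?_cons, Option.some.injEq] at hf
            subst hf
            simp only [List.isEmpty_nil, if_true, List.reverse_cons,
              List.dropLast_concat]
            have hw0 : PySem.List.pyGetD (dropped ++ (([] : List Int).reverse ++ i :: is) ++ rest)
                (dropped.length : Int) 0 = i := by
              have hl : dropped ++ (([] : List Int).reverse ++ i :: is) ++ rest
                  = dropped ++ i :: (is ++ rest) := by simp
              rw [hl]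
              exact pyGetD_head dropped (is ++ rest) i
            rw [hw0]
            have hq : dropped ++ (([] : List Int).reverse ++ i :: is) ++ rest
                = (dropped ++ [i]) ++ (is.reverse.reverse ++ ([] : List Int)) ++ rest := by simp
            have hs : (dropped.length : Int) + 1 = (((dropped ++ [i]).length : Nat) : Int) := by simp
            have he : (dropped.length : Int) + (((([] : List Int).reverse ++ i :: is).length : Nat) : Int) - 1
                = (((dropped ++ [i]).length : Nat) : Int)
                  + (((is.reverse.reverse ++ ([] : List Int)).length : Nat) : Int) - 1 := by
              push_cast [List.length_append, List.length_cons, List.length_nil, List.length_reverse,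
                List.reverse_nil, List.nil_append]
              ring
            rw [hq, hs, he]
            exact ih is.reverse [] rest (by simp at hlen ⊢; omega) (dropped ++ [i]) target
              (temp - i) (cnt + 1)
          · -- out = ys ++ [a]: pop a from out
            simp only [List.concat_eq_append] at hlen hf ⊢
            have hne : (ys ++ [a]).isEmpty = false := by simp
            rw [hne] at hf ⊢
            simp only [Bool.false_eq_true, if_false, List.getLast?_concat, Option.some.injEq] at hf
            subst hf
            simp only [Bool.false_eq_true, if_false, List.dropLast_concat]
            have hw0 : PySem.List.pyGetD (dropped ++ ((ys ++ [a]).reverse ++ inn) ++ rest)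
                (dropped.length : Int) 0 = a := by
              have hl : dropped ++ ((ys ++ [a]).reverse ++ inn) ++ rest
                  = dropped ++ a :: (ys.reverse ++ inn ++ rest) := by simp
              rw [hl]
              exact pyGetD_head dropped (ys.reverse ++ inn ++ rest) a
            rw [hw0]
            have hq : dropped ++ ((ys ++ [a]).reverse ++ inn) ++ rest
                = (dropped ++ [a]) ++ (ys.reverse ++ inn) ++ rest := by simp
            have hs : (dropped.length : Int) + 1 = (((dropped ++ [a]).length : Nat) : Int) := by simp
            have he : (dropped.length : Int) + ((((ys ++ [a]).reverse ++ inn).length : Nat) : Int) - 1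
                = (((dropped ++ [a]).length : Nat) : Int) + (((ys.reverse ++ inn).length : Nat) : Int) - 1 := by
              push_cast [List.length_append, List.length_cons, List.length_nil, List.length_reverse]
              ring
            rw [hq, hs, he]
            exact ih ys inn rest (by simp at hlen ⊢; omega) (dropped ++ [a]) target (temp - a) (cnt + 1)

-- ===== VERDICT (by name: the statement is the Claim_ definition above) =====
theorem solution_spec : Claim_equal_solution := by
  intro queue1 queue2 _hdom
  unfold Spec_solution
  simp only [solution, solution_alt]
  split_ifs with hpar
  · rfl
  · have := loopA_eq_loopB (queue1.length + 2 * queue2.length) queue1.reverse [] queue2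
      (by simp) [] (PySem.Int.floordiv (queue1.sum + queue2.sum) 2) queue1.sum 0
    simpa using this
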